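-- pv_equiv track=rewrite | github.com/Chrissy-Ann/morse-code | Lab 12-Part 2.py | filter_sentence
-- ===== SOURCE A (Python) =====
-- morse_code_dict = {
--     'a': '.-',
--     'b': '-...',
--     'c': '-.-.',
--     'd': '-..',
--     'e': '.',
--     'f': '..-.',
--     'g': '--.',
--     'h': '....',
--     'i': '..',
--     'j': '.---',
--     'k': '-.-',
--     'l': '.-..',
--     'm': '--',
--     'n': '-.',
--     'o': '---',
--     'p': '.--.',
--     'q': '--.-',
--     'r': '.-.',
--     's': '...',
--     't': '-',
--     'u': '..-',
--     'v': '...-',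
--     'w': '.--',
--     'x': '-..-',
--     'y': '-.--',
--     'z': '--..',
--     '1': '.----',
--     '2': '..---',
--     '3': '...--',
--     '4': '....-',
--     '5': '.....',
--     '6': '-....',
--     '7': '--...',
--     '8': '---..',
--     '9': '----.',
--     '0': '-----'
-- }
--
-- def filter_sentence (user_sentence):
--     """
--     Change the sentence to all lower case and
--     remove all characters that aren't in the dictionary.
--     Keep the spaces to mark the end of a word.
--     """
--
--     user_sentence = user_sentence.lower()
--     filtered_sentence = ''
--     for char in user_sentence:
--         if char in morse_code_dict:
--             filtered_sentence += char
--         elif char == ' ':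
--             filtered_sentence += ' '
--     return filtered_sentence
-- ===== SOURCE B (Python) =====
-- import re
--
-- def filter_sentence(user_sentence):
--     """
--     Change the sentence to all lower case and
--     remove all characters that aren't in the dictionary.
--     Keep the spaces to mark the end of a word.
--     """
--     # The morse dict keys are exactly a-z and 0-9, so one regex pass deletes
--     # every character outside [a-z0-9 ] from the lowercased sentence.
--     return re.sub(r'[^a-z0-9 ]', '', user_sentence.lower())
-- ===== Notes on version B (the rewrite author's own statement) =====
-- stated objective: idiomatic
-- what changed: Replaces the explicit character loop with dict-membership tests and string concatenation by a single regex substitution that deletes every character outside [a-z0-9 ] from the lowercased sentence (the morse dict keys are exactly a-z and 0-9).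
import Mathlib
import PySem

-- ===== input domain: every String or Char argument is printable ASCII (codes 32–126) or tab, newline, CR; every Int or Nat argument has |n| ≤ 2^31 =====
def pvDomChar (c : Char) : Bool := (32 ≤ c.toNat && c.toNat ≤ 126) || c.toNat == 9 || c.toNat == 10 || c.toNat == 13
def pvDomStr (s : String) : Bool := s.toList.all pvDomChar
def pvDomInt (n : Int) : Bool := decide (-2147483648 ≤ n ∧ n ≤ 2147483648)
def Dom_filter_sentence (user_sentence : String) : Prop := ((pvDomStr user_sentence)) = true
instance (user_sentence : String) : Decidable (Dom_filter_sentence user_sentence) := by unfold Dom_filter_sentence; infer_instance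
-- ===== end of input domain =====

-- B replaces A's explicit loop (dict membership + string concatenation) by one
-- regex substitution deleting every character outside [a-z0-9 ] from the
-- lowercased sentence; equal output on every input (idiomatic rewrite).


-- ===== PORT A =====
def morse_code_dict : PySem.Dict Char String := PySem.Dict.mk
  [('a', ".-"), ('b', "-..."), ('c', "-.-."), ('d', "-.."), ('e', "."), ('f', "..-."),
   ('g', "--."), ('h', "...."), ('i', ".."), ('j', ".---"), ('k', "-.-"), ('l', ".-.."),
   ('m', "--"), ('n', "-."), ('o', "---"), ('p', ".--."), ('q', "--.-"), ('r', ".-."),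
   ('s', "..."), ('t', "-"), ('u', "..-"), ('v', "...-"), ('w', ".--"), ('x', "-..-"),
   ('y', "-.--"), ('z', "--.."), ('1', ".----"), ('2', "..---"), ('3', "...--"),
   ('4', "....-"), ('5', "....."), ('6', "-...."), ('7', "--..."), ('8', "---.."),
   ('9', "----."), ('0', "-----")]

def filter_sentence (user_sentence : String) : String :=
  String.mk ((PySem.Str.lower user_sentence).toList.foldl (fun acc c =>
    if morse_code_dict.contains c then acc ++ [c]
    else if c == ' ' then acc ++ [' ']
    else acc) [])

-- ===== PORT B =====
-- re.sub(r'[^a-z0-9 ]', '', s.lower()) ported by hand: deleting every character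
-- that does not match the class [a-z0-9 ] is keeping exactly the characters in
-- that class, so it is a filter by that class over the lowercased characters
-- (exact: the class is pure single-character ASCII ranges).
def filter_sentence_alt (user_sentence : String) : String :=
  String.mk ((PySem.Chars.lower user_sentence.toList).filter
    (fun c => ('a' ≤ c && c ≤ 'z') || ('0' ≤ c && c ≤ '9') || c == ' '))

-- ===== PRECONDITION & SPEC =====
def Spec_filter_sentence (user_sentence : String) (out : String) : Prop := out = filter_sentence_alt user_sentence
instance (user_sentence : String) (out : String) : Decidable (Spec_filter_sentence user_sentence out) := by unfold Spec_filter_sentence; infer_instance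

-- ===== CLAIM (what is proved, stated in full; the proofs are below) =====
def Claim_equal_filter_sentence : Prop := ∀ (user_sentence : String), Dom_filter_sentence user_sentence → Spec_filter_sentence user_sentence (filter_sentence user_sentence)

-- ===== LEMMAS AND PROOFS =====

-- A's kept set (morse dict keys or space) is exactly B's character class.
theorem morse_keys_eq_class (c : Char) :
    (morse_code_dict.contains c || (c == ' ')) =
    (('a' ≤ c && c ≤ 'z') || ('0' ≤ c && c ≤ '9') || c == ' ') := by
  simp only [morse_code_dict, PySem.Dict.contains_mk, List.any_cons, List.any_nil]
  apply Bool.eq_iff_iff.mpr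
  simp only [Bool.or_eq_true, Bool.and_eq_true, beq_iff_eq, decide_eq_true_eq,
    Char.ext_iff, Char.le_def, UInt32.le_iff_toNat_le, Bool.false_eq_true, or_false, ← UInt32.toNat_inj]
  have hc97 : ('a' : Char).val.toNat = 97 := rfl
  have hc98 : ('b' : Char).val.toNat = 98 := rfl
  have hc99 : ('c' : Char).val.toNat = 99 := rfl
  have hc100 : ('d' : Char).val.toNat = 100 := rfl
  have hc101 : ('e' : Char).val.toNat = 101 := rfl
  have hc102 : ('f' : Char).val.toNat = 102 := rfl
  have hc103 : ('g' : Char).val.toNat = 103 := rfl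
  have hc104 : ('h' : Char).val.toNat = 104 := rfl
  have hc105 : ('i' : Char).val.toNat = 105 := rfl
  have hc106 : ('j' : Char).val.toNat = 106 := rfl
  have hc107 : ('k' : Char).val.toNat = 107 := rfl
  have hc108 : ('l' : Char).val.toNat = 108 := rfl
  have hc109 : ('m' : Char).val.toNat = 109 := rfl
  have hc110 : ('n' : Char).val.toNat = 110 := rfl
  have hc111 : ('o' : Char).val.toNat = 111 := rfl
  have hc112 : ('p' : Char).val.toNat = 112 := rfl
  have hc113 : ('q' : Char).val.toNat = 113 := rfl
  have hc114 : ('r' : Char).val.toNat = 114 := rfl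
  have hc115 : ('s' : Char).val.toNat = 115 := rfl
  have hc116 : ('t' : Char).val.toNat = 116 := rfl
  have hc117 : ('u' : Char).val.toNat = 117 := rfl
  have hc118 : ('v' : Char).val.toNat = 118 := rfl
  have hc119 : ('w' : Char).val.toNat = 119 := rfl
  have hc120 : ('x' : Char).val.toNat = 120 := rfl
  have hc121 : ('y' : Char).val.toNat = 121 := rfl
  have hc122 : ('z' : Char).val.toNat = 122 := rfl
  have hc49 : ('1' : Char).val.toNat = 49 := rfl
  have hc50 : ('2' : Char).val.toNat = 50 := rfl
  have hc51 : ('3' : Char).val.toNat = 51 := rfl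
  have hc52 : ('4' : Char).val.toNat = 52 := rfl
  have hc53 : ('5' : Char).val.toNat = 53 := rfl
  have hc54 : ('6' : Char).val.toNat = 54 := rfl
  have hc55 : ('7' : Char).val.toNat = 55 := rfl
  have hc56 : ('8' : Char).val.toNat = 56 := rfl
  have hc57 : ('9' : Char).val.toNat = 57 := rfl
  have hc48 : ('0' : Char).val.toNat = 48 := rfl
  have hc32 : (' ' : Char).val.toNat = 32 := rfl
  omega

-- A's accumulation loop is a filter by B's character class.
theorem fold_eq (l acc : List Char) :
    l.foldl (fun acc c =>
      if morse_code_dict.contains c then acc ++ [c]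
      else if c == ' ' then acc ++ [' ']
      else acc) acc
    = acc ++ l.filter (fun c => ('a' ≤ c && c ≤ 'z') || ('0' ≤ c && c ≤ '9') || c == ' ') := by
  have hf : (fun (acc : List Char) c =>
      if morse_code_dict.contains c then acc ++ [c]
      else if c == ' ' then acc ++ [' ']
      else acc)
      = fun acc c => if (('a' ≤ c && c ≤ 'z') || ('0' ≤ c && c ≤ '9') || c == ' ') then acc ++ [c] else acc := by
    funext acc c
    rw [← morse_keys_eq_class c]
    by_cases h1 : morse_code_dict.contains c = true
    · simp [h1]
    · by_cases h2 : c = ' ' <;> simp [h1, h2]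
  rw [hf, PySem.List.foldl_append_if_eq_filter]

-- ===== VERDICT (by name: the statement is the Claim_ definition above) =====
theorem filter_sentence_spec : Claim_equal_filter_sentence := by
  intro s _
  unfold Spec_filter_sentence filter_sentence filter_sentence_alt
  rw [fold_eq]
  simp [PySem.Str.toList_lower]
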